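-- pv_equiv track=rewrite | github.com/brandonharris177/edabit-challanges | index.py | fileNaming
-- ===== SOURCE A (Python) =====
-- def fileNaming(names):
--     hashTable ={}
--     for index in range(0, len(names)):
--         original_name = names[index]
--         if original_name in hashTable:
--             newName = original_name + "(" + str(hashTable[original_name]) + ")"
--             while newName in hashTable:
--                 hashTable[original_name] += 1
--                 newName = original_name + "(" + str(hashTable[original_name]) + ")"
--             hashTable[original_name] += 1
--             hashTable[newName] = 1
--             names[index] = newName
--         else:
--             hashTable[original_name] = 1
--
--     return names
-- ===== SOURCE B (Python) =====
-- def fileNaming(names):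
--     # Mutates `names` in place (like the original) and returns it.
--     used = set()
--     for i in range(len(names)):
--         name = names[i]
--         if name in used:
--             # One pass over `used`: collect the numeric suffixes already taken
--             # for this base name (u == name + "(" + m + ")", m digits, no
--             # leading zero).  Sorting by (len, lex) is numeric order for such
--             # strings; the first gap in 1,2,... is the suffix to use.
--             prefix = name + "("
--             suffixes = []
--             for u in used:
--                 if u.startswith(prefix) and u.endswith(")"):
--                     m = u[len(prefix):len(u) - 1]
--                     if m.isdigit() and not m.startswith("0"):
--                         suffixes.append(m)
--             suffixes.sort(key=lambda m: (len(m), m))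
--             k = 1
--             for m in suffixes:
--                 if m == str(k):
--                     k += 1
--                 else:
--                     break
--             name = prefix + str(k) + ")"
--             names[i] = name
--         used.add(name)
--     return names
-- ===== Notes on version B (the rewrite author's own statement) =====
-- stated objective: alternative
-- what changed: Instead of A's probing of candidate names name(1), name(2), ... against a table of counters until one is free, B on each duplicate makes one pass over the set of taken names parsing out the numeric suffixes already used for that base (u == name+'('+m+')', m digits, no leading zero), sorts them into numeric order via a (length, lexicographic) key, and picks the first gap in 1,2,... by a single scan.
import Mathlib
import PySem

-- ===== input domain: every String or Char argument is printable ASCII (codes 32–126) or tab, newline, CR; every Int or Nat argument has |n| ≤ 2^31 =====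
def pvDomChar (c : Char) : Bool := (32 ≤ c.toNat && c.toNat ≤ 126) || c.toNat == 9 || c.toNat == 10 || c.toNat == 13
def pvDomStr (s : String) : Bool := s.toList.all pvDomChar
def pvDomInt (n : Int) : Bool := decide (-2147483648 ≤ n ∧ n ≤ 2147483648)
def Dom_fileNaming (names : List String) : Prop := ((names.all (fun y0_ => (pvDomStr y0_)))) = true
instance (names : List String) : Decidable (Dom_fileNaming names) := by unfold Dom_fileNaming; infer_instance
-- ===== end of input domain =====

-- B replaces A's probing of candidate names against a counter table by: one pass over the
-- set of taken names extracting the numeric suffixes already used for this base, a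
-- (length, lexicographic) sort putting them in numeric order, and a single scan for the
-- first gap.  Both Pythons mutate `names` in place and return it; the equivalence proved
-- here is about the return value.

-- name + "(" + str(k) + ")"
def pvCand (s : String) (k : Int) : String := s ++ "(" ++ PySem.Int.toStr k ++ ")"

-- ===== PORT A =====
-- the `while newName in hashTable:` loop; the fuel argument is only a termination
-- device (pvWhileA_spec shows fuel d.size + 1 always suffices, so behaviour matches Python's unbounded loop)
def pvWhileA (orig : String) : Nat → PySem.Dict String Int → String → PySem.Dict String Int × String
  | 0, d, nn => (d, nn)
  | f + 1, d, nn =>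
    if d.contains nn then
      let d' := d.insert orig (d.getD orig 0 + 1)        -- hashTable[original_name] += 1
      pvWhileA orig f d' (pvCand orig (d'.getD orig 0))  -- newName = original_name + "(" + str(hashTable[original_name]) + ")"
    else (d, nn)

-- the `for index in range(0, len(names))` loop (it reads/writes only names[index], so it is the
-- structural recursion over the list, carrying hashTable)
def pvGoA (d : PySem.Dict String Int) : List String → List String
  | [] => []
  | orig :: rest =>
    if d.contains orig then
      let p := pvWhileA orig (d.size + 1) d (pvCand orig (d.getD orig 0))
      let d2 := (p.1.insert orig (p.1.getD orig 0 + 1)).insert p.2 1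
      p.2 :: pvGoA d2 rest
    else orig :: pvGoA (d.insert orig 1) rest

def fileNaming (names : List String) : List String := pvGoA PySem.Dict.empty names

-- ===== PORT B =====
-- the `for u in used:` collection loop of Source B
def pvSufFold (pre : String) (used : List String) : List String :=
  used.foldl (fun acc u =>
    if PySem.Str.startswith u pre && PySem.Str.endswith u ")" then
      let m := PySem.Str.slice u (some (PySem.Str.len pre)) (some (PySem.Str.len u - 1))
      if PySem.Str.strIsdigit m && !PySem.Str.startswith m "0" then acc ++ [m] else acc
    else acc) []

-- the `for m in suffixes: if m == str(k): k += 1 else: break` scan of Source B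
def pvMex : Int → List String → Int
  | k, [] => k
  | k, m :: rest => if m = PySem.Int.toStr k then pvMex (k + 1) rest else k

def pvGoB (used : PySem.Set String) : List String → List String
  | [] => []
  | name :: rest =>
    if PySem.Set.contains used name then
      let pre := name ++ "("
      let suffixes := PySem.List.sorted2 (pvSufFold pre used) (fun m => PySem.Str.len m) (fun m => m)
      let newName := pre ++ PySem.Int.toStr (pvMex 1 suffixes) ++ ")"
      newName :: pvGoB (PySem.Set.add used newName) rest
    else name :: pvGoB (PySem.Set.add used name) rest

def fileNaming_alt (names : List String) : List String := pvGoB PySem.Set.empty names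

-- ===== PRECONDITION & SPEC =====
def Spec_fileNaming (names : List String) (out : List String) : Prop := out = fileNaming_alt names
instance (names : List String) (out : List String) : Decidable (Spec_fileNaming names out) := by unfold Spec_fileNaming; infer_instance

-- ===== CLAIM (what is proved, stated in full; the proofs are below) =====
def Claim_equal_fileNaming : Prop := ∀ (names : List String), Dom_fileNaming names → Spec_fileNaming names (fileNaming names)

-- ===== LEMMAS AND PROOFS =====

def pvDig10 (n : Nat) : List Char :=
  if h : n < 10 then [Nat.digitChar n]
  else pvDig10 (n / 10) ++ [Nat.digitChar (n % 10)]
  decreasing_by exact Nat.div_lt_self (by omega) (by omega)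

-- loop/state invariant tying A's hashTable to B's used-set
def pvInv (d : PySem.Dict String Int) (used : List String) : Prop :=
  used.Nodup ∧
  d.keys.Nodup ∧
  (∀ t, d.contains t = PySem.Set.contains used t) ∧
  used.length = d.size ∧
  (∀ s c, d.get? s = some c → 1 ≤ c ∧ ∀ k : Int, 1 ≤ k → k < c → d.contains (pvCand s k) = true)

theorem pvToDigitsCore_eq : ∀ (f : Nat), ∀ n ds, n < 10 ^ (f + 1) →
    Nat.toDigitsCore 10 (f + 1) n ds = pvDig10 n ++ ds := by
  intro f
  induction f with
  | zero =>
    intro n ds h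
    have h10 : n < 10 := by simpa using h
    rw [Nat.toDigitsCore, pvDig10]
    rw [dif_pos h10, if_pos (Nat.div_eq_of_lt h10), Nat.mod_eq_of_lt h10]
    rfl
  | succ f ih =>
    intro n ds h
    rw [Nat.toDigitsCore]
    by_cases h10 : n < 10
    · rw [pvDig10]
      simp [Nat.div_eq_of_lt h10, Nat.mod_eq_of_lt h10, h10]
    · have hdiv : n / 10 ≠ 0 := by
        intro h0; exact h10 (Nat.lt_of_div_eq_zero (by omega) h0)
      rw [if_neg hdiv]
      rw [ih (n / 10) _ (by
        have : n / 10 < 10 ^ (f + 1) := by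
          apply Nat.div_lt_of_lt_mul
          rw [pow_succ] at h
          omega
        exact this)]
      conv_rhs => rw [pvDig10]
      simp [h10]

theorem pvToDigits_eq (n : Nat) : Nat.toDigits 10 n = pvDig10 n := by
  have h : n < 10 ^ (n + 1) := by
    calc n < 2 ^ n := Nat.lt_two_pow_self
    _ ≤ 10 ^ n := Nat.pow_le_pow_left (by omega) n
    _ ≤ 10 ^ (n + 1) := Nat.pow_le_pow_right (by omega) (by omega)
  simpa [Nat.toDigits] using pvToDigitsCore_eq n n [] h

theorem pvDig10_ne_nil (n : Nat) : pvDig10 n ≠ [] := by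
  rw [pvDig10]
  split <;> simp

theorem pvDigitChar_inj : ∀ a, a < 10 → ∀ b, b < 10 → Nat.digitChar a = Nat.digitChar b → a = b := by
  decide

theorem pvDig10_lt {n : Nat} (h : n < 10) : pvDig10 n = [Nat.digitChar n] := by
  rw [pvDig10]; simp [h]

theorem pvDig10_ge {n : Nat} (h : ¬ n < 10) :
    pvDig10 n = pvDig10 (n / 10) ++ [Nat.digitChar (n % 10)] := by
  rw [pvDig10]; simp [h]

theorem pvDig10_inj : ∀ (m n : Nat), pvDig10 m = pvDig10 n → m = n := by
  intro m
  induction m using Nat.strong_induction_on with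
  | _ m ih =>
    intro n h
    by_cases hm : m < 10 <;> by_cases hn : n < 10
    · rw [pvDig10_lt hm, pvDig10_lt hn] at h
      exact pvDigitChar_inj m hm n hn (List.singleton_inj.mp h)
    · rw [pvDig10_lt hm, pvDig10_ge hn] at h
      have := congrArg List.length h
      simp at this
      exact absurd this (pvDig10_ne_nil _)
    · rw [pvDig10_ge hm, pvDig10_lt hn] at h
      have := congrArg List.length h
      simp at this
      exact absurd this (pvDig10_ne_nil _)
    · rw [pvDig10_ge hm, pvDig10_ge hn] at h
      have h2 := List.append_inj' h (by simp)
      have hdiv : m / 10 = n / 10 := ih (m / 10) (Nat.div_lt_self (by omega) (by omega)) _ h2.1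
      have hmod : m % 10 = n % 10 :=
        pvDigitChar_inj _ (Nat.mod_lt _ (by omega)) _ (Nat.mod_lt _ (by omega))
          (List.singleton_inj.mp h2.2)
      omega

theorem pvToStr_inj {a b : Int} (ha : 0 ≤ a) (hb : 0 ≤ b)
    (h : PySem.Int.toStr a = PySem.Int.toStr b) : a = b := by
  have h2 : PySem.Int.toChars a = PySem.Int.toChars b := by
    have := congrArg String.toList h
    simpa [PySem.Int.toStr] using this
  rw [PySem.Int.toChars, PySem.Int.toChars, if_neg (by omega), if_neg (by omega)] at h2
  rw [pvToDigits_eq, pvToDigits_eq] at h2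
  have := pvDig10_inj _ _ h2
  omega

theorem pvCand_inj (s : String) {k1 k2 : Int} (h1 : 1 ≤ k1) (h2 : 1 ≤ k2)
    (h : pvCand s k1 = pvCand s k2) : k1 = k2 := by
  have hl := congrArg String.toList h
  simp only [pvCand, String.toList_append, List.append_assoc] at hl
  have hl2 := List.append_cancel_left hl
  have hl3 := List.append_cancel_left hl2
  have hl4 : (PySem.Int.toStr k1).toList = (PySem.Int.toStr k2).toList :=
    (List.append_inj' hl3 rfl).1
  exact pvToStr_inj (by omega) (by omega) (String.toList_inj.mp hl4)

theorem pvCand_ne (s : String) (k : Int) : pvCand s k ≠ s := by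
  intro h
  have := congrArg (fun t => t.toList.length) h
  simp [pvCand, String.toList_append] at this

theorem pvContains_insert_mem {d : PySem.Dict String Int} {orig : String}
    (h : d.contains orig = true) (v : Int) (t : String) :
    (d.insert orig v).contains t = d.contains t := by
  rw [PySem.Dict.contains_insert]
  by_cases ht : t = orig
  · subst ht; simp [h]
  · simp [ht]

theorem pvKeysLen (d : PySem.Dict String Int) : d.keys.length = d.size := by
  simp [PySem.Dict.keys, PySem.Dict.size]

theorem pvExists_free (d : PySem.Dict String Int) (hnd : d.keys.Nodup) (s : String) :
    ∃ j : Nat, d.contains (pvCand s (1 + (j : Int))) = false := by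
  by_contra hc
  push_neg at hc
  have hall : ∀ j : Nat, d.contains (pvCand s (1 + (j : Int))) = true := by
    intro j; cases h : d.contains (pvCand s (1 + (j : Int)))
    · exact absurd h (hc j)
    · rfl
  have hsub : ((List.range (d.size + 1)).map (fun (j : Nat) => pvCand s (1 + (j : Int)))) ⊆ d.keys := by
    intro x hx
    simp only [List.mem_map, List.mem_range] at hx
    obtain ⟨j, _, rfl⟩ := hx
    exact (PySem.Dict.contains_iff_mem_keys _ _).mp (hall j)
  have hnodL : ((List.range (d.size + 1)).map (fun (j : Nat) => pvCand s (1 + (j : Int)))).Nodup := by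
    refine List.Nodup.map_on ?_ (List.nodup_range)
    intro x _ y _ hxy
    have := pvCand_inj s (k1 := 1 + (x : Int)) (k2 := 1 + (y : Int)) (by omega) (by omega) hxy
    omega
  have := (hnodL.subperm hsub).length_le
  simp [pvKeysLen] at this

theorem pvWhileA_spec : ∀ (f : Nat) (d : PySem.Dict String Int) (orig : String) (c k : Int),
    d.get? orig = some c → c ≤ k →
    (∀ j : Int, c ≤ j → j < k → d.contains (pvCand orig j) = true) →
    d.contains (pvCand orig k) = false →
    (k - c).toNat < f →
    ∃ dW, pvWhileA orig f d (pvCand orig c) = (dW, pvCand orig k) ∧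
      dW.getD orig 0 = k ∧
      (∀ t, dW.contains t = d.contains t) ∧
      (∀ v, dW.insert orig v = d.insert orig v) := by
  intro f
  induction f with
  | zero => intro d orig c k _ _ _ _ hf; omega
  | succ f ih =>
    intro d orig c k hget hck hscan hfree hf
    have hmem : d.contains orig = true := by
      rw [PySem.Dict.contains_eq_isSome_get?, hget]; rfl
    rw [pvWhileA]
    by_cases hek : c = k
    · subst hek
      rw [if_neg (by simpa using hfree)]
      exact ⟨d, rfl, PySem.Dict.getD_of_get?_eq_some _ _ hget, fun _ => rfl, fun _ => rfl⟩
    · have hlt : c < k := by omega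
      rw [if_pos (hscan c le_rfl hlt)]
      have hgD : d.getD orig 0 = c := PySem.Dict.getD_of_get?_eq_some _ _ hget
      simp only [hgD, PySem.Dict.getD_insert_self]
      obtain ⟨dW, heq, hgd, hcont, hins⟩ :=
        ih (d.insert orig (c + 1)) orig (c + 1) k
          (PySem.Dict.get?_insert_self _ _ _)
          (by omega)
          (fun j hj1 hj2 => by rw [pvContains_insert_mem hmem]; exact hscan j (by omega) hj2)
          (by rw [pvContains_insert_mem hmem]; exact hfree)
          (by omega)
      refine ⟨dW, heq, hgd, ?_, ?_⟩
      · intro t; rw [hcont, pvContains_insert_mem hmem]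
      · intro v; rw [hins, PySem.Dict.insert_insert_self]

theorem pvCount_bound (d : PySem.Dict String Int) (hnd : d.keys.Nodup) (s : String) (m : Nat)
    (hs : d.contains s = true)
    (h : ∀ j : Nat, j < m → d.contains (pvCand s (1 + (j : Int))) = true) :
    m + 1 ≤ d.size := by
  have hsub : (s :: (List.range m).map (fun (j : Nat) => pvCand s (1 + (j : Int)))) ⊆ d.keys := by
    intro x hx
    rcases List.mem_cons.mp hx with rfl | hx
    · exact (PySem.Dict.contains_iff_mem_keys _ _).mp hs
    · simp only [List.mem_map, List.mem_range] at hx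
      obtain ⟨j, hj, rfl⟩ := hx
      exact (PySem.Dict.contains_iff_mem_keys _ _).mp (h j hj)
  have hnodL : (s :: (List.range m).map (fun (j : Nat) => pvCand s (1 + (j : Int)))).Nodup := by
    refine List.nodup_cons.mpr ⟨?_, ?_⟩
    · intro hmem
      simp only [List.mem_map, List.mem_range] at hmem
      obtain ⟨j, _, hj⟩ := hmem
      exact pvCand_ne s _ hj
    · refine List.Nodup.map_on ?_ (List.nodup_range)
      intro x _ y _ hxy
      have := pvCand_inj s (k1 := 1 + (x : Int)) (k2 := 1 + (y : Int)) (by omega) (by omega) hxy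
      omega
  have := (hnodL.subperm hsub).length_le
  simpa [pvKeysLen] using this

theorem pvSetContains_append (used : List String) (x t : String) :
    PySem.Set.contains (used ++ [x]) t = (t == x || PySem.Set.contains used t) := by
  simp [PySem.Set.contains, Bool.or_comm, beq_eq_decide]

-- ---------- digit groundwork (B side) ----------

theorem pvDigitChar_isDigit : ∀ d, d < 10 → (Nat.digitChar d).isDigit = true := by decide

theorem pvDigitChar_toNat : ∀ d, d < 10 → (Nat.digitChar d).toNat = 48 + d := by decide

theorem pvIsDigit_toNat {c : Char} (h : c.isDigit = true) : 48 ≤ c.toNat ∧ c.toNat ≤ 57 := by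
  simp only [Char.isDigit, decide_eq_true_eq, Bool.and_eq_true, ge_iff_le] at h
  obtain ⟨h1, h2⟩ := h
  exact ⟨h1, h2⟩

theorem pvDigitChar_ofNat : ∀ k < 58, 48 ≤ k → Nat.digitChar (k - 48) = Char.ofNat k := by decide

theorem pvDigitChar_of_char {c : Char} (h : c.isDigit = true) :
    Nat.digitChar (c.toNat - 48) = c := by
  obtain ⟨h1, h2⟩ := pvIsDigit_toNat h
  rw [pvDigitChar_ofNat c.toNat (by omega) h1, Char.ofNat_toNat]

theorem pvDig10_digits : ∀ n, ∀ c ∈ pvDig10 n, c.isDigit = true := by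
  intro n
  induction n using Nat.strong_induction_on with
  | _ n ih =>
    intro c hc
    by_cases h : n < 10
    · rw [pvDig10_lt h] at hc
      simp at hc
      subst hc
      exact pvDigitChar_isDigit n h
    · rw [pvDig10_ge h] at hc
      rcases List.mem_append.mp hc with hc | hc
      · exact ih (n / 10) (Nat.div_lt_self (by omega) (by omega)) c hc
      · simp at hc
        subst hc
        exact pvDigitChar_isDigit _ (Nat.mod_lt _ (by omega))

theorem pvDig10_len2 {n : Nat} (h : 10 ≤ n) : 2 ≤ (pvDig10 n).length := by
  rw [pvDig10_ge (by omega)]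
  have := pvDig10_ne_nil (n / 10)
  have : 1 ≤ (pvDig10 (n / 10)).length := List.length_pos_iff.mpr this
  simp
  omega

theorem pvDig10_head : ∀ n, 1 ≤ n → (pvDig10 n).head? ≠ some '0' := by
  intro n
  induction n using Nat.strong_induction_on with
  | _ n ih =>
    intro hn
    by_cases h : n < 10
    · rw [pvDig10_lt h]
      intro hc
      simp at hc
      have : ∀ d, 1 ≤ d → d < 10 → Nat.digitChar d ≠ '0' := by decide
      exact this n hn h hc
    · rw [pvDig10_ge h]
      rw [List.head?_append]
      cases he : (pvDig10 (n / 10)).head? with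
      | none => exact absurd (List.head?_eq_none_iff.mp he) (pvDig10_ne_nil _)
      | some c =>
        have := ih (n / 10) (Nat.div_lt_self (by omega) (by omega)) (by omega)
        rw [he] at this
        simpa using this

def pvValD (cs : List Char) : Nat := cs.foldl (fun a c => a * 10 + (c.toNat - 48)) 0

theorem pvValD_append (cs : List Char) (c : Char) :
    pvValD (cs ++ [c]) = 10 * pvValD cs + (c.toNat - 48) := by
  simp [pvValD, List.foldl_append]
  ring

theorem pvValD_dig : ∀ n, pvValD (pvDig10 n) = n := by
  intro n
  induction n using Nat.strong_induction_on with
  | _ n ih =>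
    by_cases h : n < 10
    · rw [pvDig10_lt h]
      simp [pvValD, pvDigitChar_toNat n h]
    · rw [pvDig10_ge h, pvValD_append, ih (n / 10) (Nat.div_lt_self (by omega) (by omega)),
        pvDigitChar_toNat _ (Nat.mod_lt _ (by omega))]
      omega

theorem pvValD_foldl_ge (t : List Char) : ∀ a : Nat, a ≤ t.foldl (fun a c => a * 10 + (c.toNat - 48)) a := by
  induction t with
  | nil => intro a; simp
  | cons c rest ih =>
    intro a
    simp only [List.foldl_cons]
    calc a ≤ a * 10 + (c.toNat - 48) := by omega
    _ ≤ _ := ih _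

theorem pvValD_pos {cs : List Char} (hne : cs ≠ []) (hd : ∀ c ∈ cs, c.isDigit = true)
    (hz : cs.head? ≠ some '0') : 1 ≤ pvValD cs := by
  obtain ⟨c, t, rfl⟩ := List.exists_cons_of_ne_nil hne
  have hcd : c.isDigit = true := hd c (by simp)
  have hct := pvIsDigit_toNat hcd
  have hc0 : c ≠ '0' := by
    intro h; subst h; simp at hz
  have hcn : c.toNat ≠ 48 := by
    intro h
    apply hc0
    have := pvDigitChar_of_char hcd
    rw [h] at this
    simpa using this.symm
  have : 1 ≤ c.toNat - 48 := by omega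
  calc 1 ≤ c.toNat - 48 := this
  _ ≤ _ := by
      simpa [pvValD] using pvValD_foldl_ge t (c.toNat - 48)

theorem pvDig_valD : ∀ cs : List Char, cs ≠ [] → (∀ c ∈ cs, c.isDigit = true) →
    cs.head? ≠ some '0' → pvDig10 (pvValD cs) = cs := by
  intro cs
  induction cs using List.reverseRecOn with
  | nil => intro h; exact absurd rfl h
  | append_singleton ys c ih =>
    intro _ hd hz
    have hcd : c.isDigit = true := hd c (by simp)
    have hct := pvIsDigit_toNat hcd
    rw [pvValD_append]
    rcases eq_or_ne ys [] with rfl | hys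
    · simp only [pvValD, List.foldl_nil]
      have hz' : c ≠ '0' := by
        intro h; subst h; simp at hz
      have hcn : c.toNat ≠ 48 := by
        intro h
        apply hz'
        have := pvDigitChar_of_char hcd
        rw [h] at this
        simpa using this.symm
      rw [Nat.mul_zero, Nat.zero_add, pvDig10_lt (by omega), pvDigitChar_of_char hcd]
      simp
    · have hdy : ∀ x ∈ ys, x.isDigit = true := fun x hx => hd x (by simp [hx])
      have hzy : ys.head? ≠ some '0' := by
        rw [List.head?_append] at hz
        cases he : ys.head? with
        | none => exact absurd (List.head?_eq_none_iff.mp he) hys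
        | some x =>
          rw [he] at hz
          simpa using hz
      have hv := pvValD_pos hys hdy hzy
      have ihys := ih hys hdy hzy
      have h10 : ¬ (10 * pvValD ys + (c.toNat - 48) < 10) := by omega
      rw [pvDig10_ge h10]
      have hdiv : (10 * pvValD ys + (c.toNat - 48)) / 10 = pvValD ys := by omega
      have hmod : (10 * pvValD ys + (c.toNat - 48)) % 10 = c.toNat - 48 := by omega
      rw [hdiv, hmod, ihys, pvDigitChar_of_char hcd]

theorem pvDig10_len_mono : ∀ n m, m ≤ n → (pvDig10 m).length ≤ (pvDig10 n).length := by
  intro n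
  induction n using Nat.strong_induction_on with
  | _ n ih =>
    intro m hmn
    by_cases hn : n < 10
    · rw [pvDig10_lt hn, pvDig10_lt (by omega)]
      simp
    · by_cases hm : m < 10
      · rw [pvDig10_lt hm]
        have := List.length_pos_iff.mpr (pvDig10_ne_nil n)
        simpa using this
      · rw [pvDig10_ge hm, pvDig10_ge hn]
        simp only [List.length_append, List.length_cons, List.length_nil]
        have := ih (n / 10) (Nat.div_lt_self (by omega) (by omega)) (m / 10) (Nat.div_le_div_right hmn)
        omega

theorem pvLex_append_right : ∀ (a b u v : List Char), a.length = b.length →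
    List.Lex (· < ·) a b → List.Lex (· < ·) (a ++ u) (b ++ v) := by
  intro a
  induction a with
  | nil =>
    intro b u v hl hlex
    cases hlex <;> simp at hl
  | cons x xs ih =>
    intro b u v hl hlex
    cases hlex with
    | rel h => exact List.Lex.rel h
    | cons h =>
      rename_i ys
      simp at hl
      exact List.Lex.cons (ih ys u v hl h)

theorem pvLex_append_last : ∀ (a : List Char) (x y : Char), x < y →
    List.Lex (· < ·) (a ++ [x]) (a ++ [y]) := by
  intro a x y h
  induction a with
  | nil => exact List.Lex.rel h
  | cons c t ih => exact List.Lex.cons ih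

theorem pvDigitChar_lt : ∀ a, a < 10 → ∀ b, b < 10 → a < b → Nat.digitChar a < Nat.digitChar b := by
  decide

theorem pvDig10_lex : ∀ n m, m < n → (pvDig10 m).length = (pvDig10 n).length →
    List.Lex (· < ·) (pvDig10 m) (pvDig10 n) := by
  intro n
  induction n using Nat.strong_induction_on with
  | _ n ih =>
    intro m hmn hlen
    by_cases hn : n < 10
    · rw [pvDig10_lt hn, pvDig10_lt (by omega)]
      exact List.Lex.rel (pvDigitChar_lt m (by omega) n hn hmn)
    · by_cases hm : m < 10
      · exfalso
        rw [pvDig10_lt hm] at hlen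
        have := pvDig10_len2 (n := n) (by omega)
        simp at hlen
        omega
      · rw [pvDig10_ge hm, pvDig10_ge hn]
        rw [pvDig10_ge hm, pvDig10_ge hn] at hlen
        simp only [List.length_append, List.length_cons, List.length_nil] at hlen
        have hlen' : (pvDig10 (m / 10)).length = (pvDig10 (n / 10)).length := by omega
        rcases Nat.lt_or_ge (m / 10) (n / 10) with hq | hq
        · exact pvLex_append_right _ _ _ _ hlen' (ih (n / 10) (Nat.div_lt_self (by omega) (by omega)) (m / 10) hq hlen')
        · have hqe : m / 10 = n / 10 := by
            have : m / 10 ≤ n / 10 := Nat.div_le_div_right (by omega)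
            omega
          have hr : m % 10 < n % 10 := by omega
          rw [hqe]
          exact pvLex_append_last _ _ _ (pvDigitChar_lt _ (Nat.mod_lt _ (by omega)) _ (Nat.mod_lt _ (by omega)) hr)

-- ---------- canonical digit strings and the (len, lex) key ----------

def pvCanonS (m : String) : Prop :=
  m.toList ≠ [] ∧ (∀ c ∈ m.toList, c.isDigit = true) ∧ m.toList.head? ≠ some '0'

def pvKey (m : String) : Lex (Int × String) := toLex (PySem.Str.len m, m)

theorem pvCanon_eq_dig {m : String} (h : pvCanonS m) :
    m.toList = pvDig10 (pvValD m.toList) := (pvDig_valD m.toList h.1 h.2.1 h.2.2).symm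

theorem pvCanon_val_pos {m : String} (h : pvCanonS m) : 1 ≤ pvValD m.toList :=
  pvValD_pos h.1 h.2.1 h.2.2

theorem pvStr_lt_iff {a b : String} : a < b ↔ List.Lex (· < ·) a.toList b.toList := by
  rw [String.lt_iff_toList_lt]
  exact List.lt_iff_lex_lt _ _

theorem pvKey_lt_of_val_lt {a b : String} (ha : pvCanonS a) (hb : pvCanonS b)
    (h : pvValD a.toList < pvValD b.toList) : pvKey a < pvKey b := by
  have hda := pvCanon_eq_dig ha
  have hdb := pvCanon_eq_dig hb
  have hlen : a.toList.length ≤ b.toList.length := by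
    rw [hda, hdb]
    exact pvDig10_len_mono _ _ (by omega)
  simp only [pvKey, Prod.Lex.lt_iff, ofLex_toLex]
  rcases Nat.lt_or_ge a.toList.length b.toList.length with hl | hl
  · left
    simp only [PySem.Str.len_eq]
    exact_mod_cast hl
  · right
    have hle : a.toList.length = b.toList.length := by omega
    constructor
    · simp only [PySem.Str.len_eq]
      exact_mod_cast hle
    · show a < b
      rw [pvStr_lt_iff, hda, hdb]
      exact pvDig10_lex _ _ h (by rw [← hda, ← hdb]; exact hle)

theorem pvCanon_inj {a b : String} (ha : pvCanonS a) (hb : pvCanonS b)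
    (h : pvValD a.toList = pvValD b.toList) : a = b := by
  apply String.toList_inj.mp
  rw [pvCanon_eq_dig ha, pvCanon_eq_dig hb, h]

theorem pvVal_lt_of_key_le {a b : String} (ha : pvCanonS a) (hb : pvCanonS b)
    (hne : a ≠ b) (h : pvKey a ≤ pvKey b) : pvValD a.toList < pvValD b.toList := by
  rcases Nat.lt_trichotomy (pvValD a.toList) (pvValD b.toList) with hv | hv | hv
  · exact hv
  · exact absurd (pvCanon_inj ha hb hv) hne
  · exact absurd (pvKey_lt_of_val_lt hb ha hv) (not_lt_of_ge h)

-- str(j) for j ≥ 1 is a canonical digit string of value j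
theorem pvToStr_toList {j : Int} (h : 1 ≤ j) :
    (PySem.Int.toStr j).toList = pvDig10 j.toNat := by
  rw [PySem.Int.toList_toStr, PySem.Int.toChars, if_neg (by omega), pvToDigits_eq]

theorem pvToStr_canon {j : Int} (h : 1 ≤ j) :
    pvCanonS (PySem.Int.toStr j) ∧ pvValD (PySem.Int.toStr j).toList = j.toNat := by
  rw [pvCanonS, pvToStr_toList h]
  exact ⟨⟨pvDig10_ne_nil _, pvDig10_digits _, pvDig10_head _ (by omega)⟩, pvValD_dig _⟩

-- ---------- the mex scan ----------

theorem pvMex_spec : ∀ (s : List String) (k : Int), 1 ≤ k →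
    s.Pairwise (fun a b => pvKey a ≤ pvKey b) → s.Nodup →
    (∀ m ∈ s, pvCanonS m ∧ k ≤ (pvValD m.toList : Int)) →
    k ≤ pvMex k s ∧ PySem.Int.toStr (pvMex k s) ∉ s ∧
      (∀ j : Int, k ≤ j → j < pvMex k s → PySem.Int.toStr j ∈ s) := by
  intro s
  induction s with
  | nil =>
    intro k hk _ _ _
    refine ⟨le_rfl, by simp [pvMex], ?_⟩
    intro j h1 h2
    simp [pvMex] at h2
    omega
  | cons m rest ih =>
    intro k hk hpair hnodup hall
    have hm := hall m (by simp)
    have hpr : rest.Pairwise (fun a b => pvKey a ≤ pvKey b) := (List.pairwise_cons.mp hpair).2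
    have hmle : ∀ b ∈ rest, pvKey m ≤ pvKey b := (List.pairwise_cons.mp hpair).1
    have hmnot : m ∉ rest := (List.nodup_cons.mp hnodup).1
    have hnr : rest.Nodup := (List.nodup_cons.mp hnodup).2
    rw [pvMex]
    by_cases he : m = PySem.Int.toStr k
    · rw [if_pos he]
      have hvm : (pvValD m.toList : Int) = k := by
        rw [he]
        have := (pvToStr_canon hk).2
        rw [this]
        omega
      have hall' : ∀ b ∈ rest, pvCanonS b ∧ k + 1 ≤ (pvValD b.toList : Int) := by
        intro b hb
        have hbc := (hall b (by simp [hb])).1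
        have hbne : m ≠ b := fun hh => hmnot (hh ▸ hb)
        have := pvVal_lt_of_key_le hm.1 hbc hbne (hmle b hb)
        refine ⟨hbc, ?_⟩
        have : (pvValD m.toList : Int) < (pvValD b.toList : Int) := by exact_mod_cast this
        omega
      obtain ⟨h1, h2, h3⟩ := ih (k + 1) (by omega) hpr hnr hall'
      refine ⟨by omega, ?_, ?_⟩
      · intro hmem
        rcases List.mem_cons.mp hmem with hh | hh
        · rw [he] at hh
          have := pvToStr_inj (a := pvMex (k + 1) rest) (b := k) (by omega) (by omega) hh
          omega
        · exact h2 hh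
      · intro j hj1 hj2
        rcases eq_or_lt_of_le hj1 with rfl | hj
        · exact List.mem_cons.mpr (Or.inl he.symm)
        · exact List.mem_cons.mpr (Or.inr (h3 j (by omega) hj2))
    · rw [if_neg he]
      refine ⟨le_rfl, ?_, ?_⟩
      · intro hmem
        rcases List.mem_cons.mp hmem with hh | hh
        · exact he hh.symm
        · -- toStr k ∈ rest: its value is k, but every rest value exceeds m's value ≥ k
          have hkc := (pvToStr_canon hk).1
          have hne : m ≠ PySem.Int.toStr k := he
          have := pvVal_lt_of_key_le hm.1 hkc hne (hmle _ hh)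
          have hvk := (pvToStr_canon hk).2
          rw [hvk] at this
          have hge := hm.2
          omega
      · intro j h1 h2
        omega

-- ---------- the suffix collection ----------

def pvPred (pre : String) (u : String) : Bool :=
  (PySem.Str.startswith u pre && PySem.Str.endswith u ")") &&
    (PySem.Str.strIsdigit (PySem.Str.slice u (some (PySem.Str.len pre)) (some (PySem.Str.len u - 1))) &&
     !PySem.Str.startswith (PySem.Str.slice u (some (PySem.Str.len pre)) (some (PySem.Str.len u - 1))) "0")

def pvMid (pre : String) (u : String) : String :=
  PySem.Str.slice u (some (PySem.Str.len pre)) (some (PySem.Str.len u - 1))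

theorem pvSufFold_eq (pre : String) (used : List String) :
    pvSufFold pre used = (used.filter (pvPred pre)).map (pvMid pre) := by
  unfold pvSufFold
  have hbody : (fun (acc : List String) (u : String) =>
      if PySem.Str.startswith u pre && PySem.Str.endswith u ")" then
        let m := PySem.Str.slice u (some (PySem.Str.len pre)) (some (PySem.Str.len u - 1))
        if PySem.Str.strIsdigit m && !PySem.Str.startswith m "0" then acc ++ [m] else acc
      else acc) =
      (fun acc u => if pvPred pre u then acc ++ [pvMid pre u] else acc) := by
    funext acc u
    simp only [pvPred, pvMid]
    cases h1 : (PySem.Str.startswith u pre && PySem.Str.endswith u ")") <;>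
      cases h2 : (PySem.Str.strIsdigit (PySem.Str.slice u (some (PySem.Str.len pre)) (some (PySem.Str.len u - 1))) &&
        !PySem.Str.startswith (PySem.Str.slice u (some (PySem.Str.len pre)) (some (PySem.Str.len u - 1))) "0") <;>
      simp only [h1, h2, Bool.false_and, Bool.true_and, Bool.and_false, Bool.and_true] <;> simp
  rw [hbody]
  exact PySem.List.foldl_append_if (pvPred pre) (pvMid pre) used []

-- slicing u[len(pre):len(u)-1] of a decomposed string picks out the middle (list level)
theorem pvSliceMid (P M : List Char) (c : Char) :
    PySem.List.slice (P ++ (M ++ [c])) (some (P.length : Int))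
      (some (((P ++ (M ++ [c])).length : Int) - 1)) = M := by
  have hlen : (P ++ (M ++ [c])).length = P.length + M.length + 1 := by
    simp only [List.length_append, List.length_cons, List.length_nil]
    omega
  rw [hlen]
  have hcast : ((P.length + M.length + 1 : Nat) : Int) - 1
      = ((P.length + M.length : Nat) : Int) := by push_cast; ring
  rw [hcast, PySem.List.slice_natCast]
  rw [List.drop_append_of_le_length (by omega)]
  simp

theorem pvMid_of_decomp (pre m : String) :
    pvMid pre ((pre ++ m) ++ ")") = m := by
  apply String.toList_inj.mp
  rw [pvMid, PySem.Str.toList_slice, PySem.Chars.slice_eq_listSlice]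
  have hul : ((pre ++ m) ++ ")").toList = pre.toList ++ (m.toList ++ [')']) := by
    simp [String.toList_append]
  rw [PySem.Str.len_eq, PySem.Str.len_eq, hul]
  exact pvSliceMid pre.toList m.toList ')'

theorem pvStrIsdigit_iff (m : String) :
    PySem.Str.strIsdigit m = true ↔ (m.toList ≠ [] ∧ ∀ c ∈ m.toList, c.isDigit = true) := by
  rw [PySem.Str.strIsdigit_eq, PySem.Chars.strIsdigit]
  rw [Bool.and_eq_true, List.all_eq_true]
  constructor
  · rintro ⟨h1, h2⟩
    refine ⟨by simpa [List.isEmpty_iff] using h1, fun c hc => ?_⟩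
    have := h2 c hc
    simpa [PySem.Chars.isdigit, Char.isDigit, Char.le_def] using this
  · rintro ⟨h1, h2⟩
    refine ⟨by simpa [List.isEmpty_iff] using h1, fun c hc => ?_⟩
    have := h2 c hc
    simpa [PySem.Chars.isdigit, Char.isDigit, Char.le_def] using this

theorem pvStartswith0_iff (m : String) :
    PySem.Str.startswith m "0" = true ↔ m.toList.head? = some '0' := by
  rw [PySem.Str.startswith_eq, PySem.Chars.startswith_iff]
  have h0 : ("0" : String).toList = ['0'] := rfl
  rw [h0]
  constructor
  · rintro ⟨t, ht⟩
    rw [← ht]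
    rfl
  · intro h
    cases hm : m.toList with
    | nil => rw [hm] at h; simp at h
    | cons x t =>
      rw [hm] at h
      simp at h
      subst h
      exact ⟨t, rfl⟩

theorem pvPred_of_decomp (pre m : String) (h : pvCanonS m) :
    pvPred pre ((pre ++ m) ++ ")") = true := by
  have hmid := pvMid_of_decomp pre m
  rw [pvMid] at hmid
  rw [pvPred, hmid]
  rw [Bool.and_eq_true, Bool.and_eq_true, Bool.and_eq_true]
  refine ⟨⟨?_, ?_⟩, ?_, ?_⟩
  · rw [PySem.Str.startswith_eq, PySem.Chars.startswith_iff]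
    exact ⟨m.toList ++ [')'], by simp [String.toList_append]⟩
  · rw [PySem.Str.endswith_eq, PySem.Chars.endswith_iff]
    exact ⟨(pre ++ m).toList, by simp [String.toList_append]⟩
  · exact (pvStrIsdigit_iff m).mpr ⟨h.1, h.2.1⟩
  · cases hc : PySem.Str.startswith m "0" with
    | false => rfl
    | true => exact absurd ((pvStartswith0_iff m).mp hc) h.2.2

theorem pvPred_sound {pre u : String} (h : pvPred pre u = true) :
    u = (pre ++ pvMid pre u) ++ ")" ∧ pvCanonS (pvMid pre u) := by
  rw [pvPred, Bool.and_eq_true, Bool.and_eq_true, Bool.and_eq_true] at h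
  obtain ⟨⟨hsw, hew⟩, hdig, hz⟩ := h
  rw [PySem.Str.startswith_eq, PySem.Chars.startswith_iff] at hsw
  rw [PySem.Str.endswith_eq, PySem.Chars.endswith_iff] at hew
  obtain ⟨t, ht⟩ := hsw    -- pre.toList ++ t = u.toList
  obtain ⟨s, hs⟩ := hew    -- s ++ ")".toList = u.toList
  have h9 : (")" : String).toList = [')'] := rfl
  rw [h9] at hs
  rw [← pvMid] at hdig hz
  have hdig' := (pvStrIsdigit_iff _).mp hdig
  -- t cannot be empty: then the middle slice would be empty, contradicting isdigit
  have htne : t ≠ [] := by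
    rintro rfl
    simp only [List.append_nil] at ht
    apply hdig'.1
    rw [pvMid, PySem.Str.toList_slice, PySem.Chars.slice_eq_listSlice,
      PySem.Str.len_eq, PySem.Str.len_eq, ← ht]
    have hlu : u.toList.length = pre.toList.length := by rw [← ht]
    apply List.eq_nil_of_length_eq_zero
    rw [PySem.List.length_slice]
    have h1 : PySem.List.clampIdx pre.toList.length ((pre.toList.length : Int)) = pre.toList.length := by
      rw [PySem.List.clampIdx_natCast]; omega
    have hle := PySem.List.clampIdx_le pre.toList.length ((pre.toList.length : Int) - 1)
    omega
  -- last char of t is ')'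
  have hlast : t.getLast? = some ')' := by
    have h1 : u.toList.getLast? = some ')' := by rw [← hs]; exact List.getLast?_concat
    have h2 : u.toList.getLast? = t.getLast? := by
      rw [← ht, List.getLast?_append]
      cases hg : t.getLast? with
      | none => exact absurd (List.getLast?_eq_none_iff.mp hg) htne
      | some x => rfl
    rw [← h2, h1]
  have htd : t = t.dropLast ++ [')'] := by
    conv_lhs => rw [← List.dropLast_append_getLast htne]
    congr 1
    rw [List.getLast?_eq_some_getLast htne] at hlast
    simpa using hlast
  have hu : u.toList = pre.toList ++ (t.dropLast ++ [')']) := by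
    rw [← ht, ← htd]
  have hmid : (pvMid pre u).toList = t.dropLast := by
    rw [pvMid, PySem.Str.toList_slice, PySem.Chars.slice_eq_listSlice,
      PySem.Str.len_eq, PySem.Str.len_eq, hu]
    exact pvSliceMid pre.toList t.dropLast ')'
  constructor
  · apply String.toList_inj.mp
    rw [hu]
    simp only [String.toList_append, h9, hmid]
    simp
  · refine ⟨hdig'.1, hdig'.2, ?_⟩
    rw [Bool.not_eq_true'] at hz
    intro hc
    rw [← pvStartswith0_iff] at hc
    rw [hc] at hz
    exact absurd hz (by simp)

theorem pvSuf_mem_iff (pre : String) (used : List String) (m : String) :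
    m ∈ pvSufFold pre used ↔ (pvCanonS m ∧ ((pre ++ m) ++ ")") ∈ used) := by
  rw [pvSufFold_eq]
  constructor
  · intro hm
    obtain ⟨u, hu, rfl⟩ := List.mem_map.mp hm
    obtain ⟨hu1, hu2⟩ := List.mem_filter.mp hu
    obtain ⟨he, hc⟩ := pvPred_sound hu2
    exact ⟨hc, by rw [← he]; exact hu1⟩
  · rintro ⟨hc, hmem⟩
    apply List.mem_map.mpr
    refine ⟨(pre ++ m) ++ ")", List.mem_filter.mpr ⟨hmem, pvPred_of_decomp pre m hc⟩, pvMid_of_decomp pre m⟩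

theorem pvSuf_nodup (pre : String) (used : List String) (h : used.Nodup) :
    (pvSufFold pre used).Nodup := by
  rw [pvSufFold_eq]
  refine List.Nodup.map_on ?_ (h.filter _)
  intro x hx y hy hxy
  have hx' := pvPred_sound (List.mem_filter.mp hx).2
  have hy' := pvPred_sound (List.mem_filter.mp hy).2
  rw [hx'.1, hy'.1, hxy]

-- sorted(suffixes, key=lambda m: (len(m), m)) is sorted by the single lexicographic key pvKey
theorem pvSorted2_eq (xs : List String) :
    PySem.List.sorted2 xs (fun m => PySem.Str.len m) (fun m => m) =
    PySem.List.sorted xs pvKey := by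
  have hfun : (fun (a b : String) =>
      decide (PySem.Str.len a < PySem.Str.len b) ||
        (!decide (PySem.Str.len b < PySem.Str.len a) && decide (a < b)))
      = fun (a b : String) => decide (pvKey a < pvKey b) := by
    funext a b
    by_cases h1 : PySem.Str.len a < PySem.Str.len b
    · have hk : pvKey a < pvKey b := by
        simp only [pvKey, Prod.Lex.lt_iff, ofLex_toLex]
        exact Or.inl h1
      rw [decide_eq_true h1, decide_eq_true hk, Bool.true_or]
    · by_cases h2 : PySem.Str.len b < PySem.Str.len a
      · have hk : ¬ pvKey a < pvKey b := by
          simp only [pvKey, Prod.Lex.lt_iff, ofLex_toLex]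
          rintro (hl | ⟨hl, _⟩)
          · omega
          · omega
        rw [decide_eq_false h1, decide_eq_true h2, decide_eq_false hk]
        rfl
      · have heq : PySem.Str.len a = PySem.Str.len b := by omega
        have hk : pvKey a < pvKey b ↔ a < b := by
          simp only [pvKey, Prod.Lex.lt_iff, ofLex_toLex]
          constructor
          · rintro (hl | ⟨_, hl⟩)
            · omega
            · exact hl
          · intro hl
            exact Or.inr ⟨heq, hl⟩
        by_cases h3 : a < b
        · rw [decide_eq_false h1, decide_eq_false h2, decide_eq_true h3,
            decide_eq_true (hk.mpr h3)]
          rfl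
        · rw [decide_eq_false h1, decide_eq_false h2, decide_eq_false h3,
            decide_eq_false (fun hc => h3 (hk.mp hc))]
          rfl
  unfold PySem.List.sorted2 PySem.List.sorted
  simp only [Bool.false_eq_true, if_false]
  rw [hfun]

theorem pvNodup_append_singleton {used : List String} {x : String}
    (h : used.Nodup) (hx : x ∉ used) : (used ++ [x]).Nodup := by
  rw [List.nodup_append]
  exact ⟨h, List.nodup_singleton x, fun a ha b hb => by
    simp at hb
    subst hb
    exact fun he => hx (he ▸ ha)⟩

-- the value B computes for a duplicate of `orig`, and its characterisation
def pvMexU (orig : String) (used : List String) : Int :=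
  pvMex 1 (PySem.List.sorted2 (pvSufFold (orig ++ "(") used) (fun m => PySem.Str.len m) (fun m => m))

theorem pvMexU_spec (orig : String) (used : List String) (hnu : used.Nodup) :
    1 ≤ pvMexU orig used ∧
    PySem.Set.contains used (pvCand orig (pvMexU orig used)) = false ∧
    (∀ j : Int, 1 ≤ j → j < pvMexU orig used →
      PySem.Set.contains used (pvCand orig j) = true) := by
  have hU : pvMexU orig used
      = pvMex 1 (PySem.List.sorted (pvSufFold (orig ++ "(") used) pvKey) := by
    rw [pvMexU, pvSorted2_eq]
  have hSnodup : (pvSufFold (orig ++ "(") used).Nodup := pvSuf_nodup _ _ hnu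
  have hLnodup :=
    ((PySem.List.sorted_perm (pvSufFold (orig ++ "(") used) pvKey false).symm).nodup hSnodup
  have hLpair := PySem.List.sorted_pairwise (pvSufFold (orig ++ "(") used) pvKey
  have hLall : ∀ m ∈ PySem.List.sorted (pvSufFold (orig ++ "(") used) pvKey,
      pvCanonS m ∧ (1 : Int) ≤ (pvValD m.toList : Int) := by
    intro m hm
    have hc := ((pvSuf_mem_iff _ used m).mp
      ((PySem.List.mem_sorted _ pvKey false m).mp hm)).1
    exact ⟨hc, by exact_mod_cast pvCanon_val_pos hc⟩
  obtain ⟨hK1, hKnot, hKall⟩ := pvMex_spec _ 1 le_rfl hLpair hLnodup hLall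
  rw [hU]
  refine ⟨hK1, ?_, ?_⟩
  · cases hc : PySem.Set.contains used
      (pvCand orig (pvMex 1 (PySem.List.sorted (pvSufFold (orig ++ "(") used) pvKey))) with
    | false => rfl
    | true =>
      exfalso
      apply hKnot
      apply (PySem.List.mem_sorted _ pvKey false _).mpr
      apply (pvSuf_mem_iff _ used _).mpr
      exact ⟨(pvToStr_canon hK1).1, (PySem.Set.contains_iff _ _).mp hc⟩
  · intro j h1 h2
    have := (pvSuf_mem_iff (orig ++ "(") used (PySem.Int.toStr j)).mp
      ((PySem.List.mem_sorted _ pvKey false _).mp (hKall j h1 h2))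
    exact (PySem.Set.contains_iff _ _).mpr this.2

-- ---------- main equivalence ----------

theorem pvMain : ∀ (names : List String) (d : PySem.Dict String Int) (used : List String),
    pvInv d used → pvGoA d names = pvGoB used names := by
  intro names
  induction names with
  | nil => intro d used _; rfl
  | cons orig rest ih =>
    intro d used hInv
    obtain ⟨hnu, hnd, hmem, hlen, hcnt⟩ := hInv
    rw [pvGoA, pvGoB]
    by_cases hin : d.contains orig = true
    · -- duplicate: rename
      rw [if_pos hin, if_pos (by rw [← hmem orig]; exact hin)]
      obtain ⟨c, hget⟩ : ∃ c, d.get? orig = some c := by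
        have := PySem.Dict.contains_eq_isSome_get? (d := d) (k := orig)
        rw [hin] at this
        exact Option.isSome_iff_exists.mp this.symm
      obtain ⟨hc1, hbelow⟩ := hcnt orig c hget
      have hex := pvExists_free d hnd orig
      set k0 := Nat.find hex with hk0
      have hfree : d.contains (pvCand orig (1 + (k0 : Int))) = false := Nat.find_spec hex
      have hbelowK : ∀ j : Int, 1 ≤ j → j < 1 + (k0 : Int) → d.contains (pvCand orig j) = true := by
        intro j hj1 hj2
        have hj : j = 1 + ((j - 1).toNat : Int) := by omega
        have hlt : (j - 1).toNat < k0 := by omega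
        have := Nat.find_min hex hlt
        rw [← hj] at this
        cases h : d.contains (pvCand orig j)
        · exact absurd h this
        · rfl
      have hcK : c ≤ 1 + (k0 : Int) := by
        by_contra hcon
        have := hbelow (1 + (k0 : Int)) (by omega) (by omega)
        rw [this] at hfree
        cases hfree
      have hbound : k0 + 1 ≤ d.size :=
        pvCount_bound d hnd orig k0 hin (fun j hj => hbelowK (1 + (j : Int)) (by omega) (by omega))
      have hgD : d.getD orig 0 = c := PySem.Dict.getD_of_get?_eq_some _ _ hget
      obtain ⟨dW, heq, hgd, hcont, hins⟩ :=
        pvWhileA_spec (d.size + 1) d orig c (1 + (k0 : Int)) hget hcK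
          (fun j hj1 hj2 => hbelowK j (by omega) hj2) hfree (by omega)
      -- B side: the first free suffix B computes
      obtain ⟨hK1, hKfree, hKtaken⟩ := pvMexU_spec orig used hnu
      -- it equals A's 1 + k0
      have hKeq : pvMexU orig used = 1 + (k0 : Int) := by
        rcases lt_trichotomy (pvMexU orig used) (1 + (k0 : Int)) with hlt | heq' | hgt
        · exfalso
          have := hbelowK _ hK1 hlt
          rw [hmem] at this
          rw [this] at hKfree
          cases hKfree
        · exact heq'
        · exfalso
          have := hKtaken (1 + (k0 : Int)) (by omega) hgt
          rw [← hmem] at this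
          rw [this] at hfree
          cases hfree
      rw [hKeq] at hKfree
      rw [hgD, heq]
      show _ = pvCand orig (pvMexU orig used)
          :: pvGoB (PySem.Set.add used (pvCand orig (pvMexU orig used))) rest
      rw [hKeq]
      show pvCand orig (1 + (k0 : Int))
            :: pvGoA ((dW.insert orig (dW.getD orig 0 + 1)).insert (pvCand orig (1 + (k0 : Int))) 1) rest
          = _
      have hnotmem : pvCand orig (1 + (k0 : Int)) ∉ used := by
        intro hmm
        have := (PySem.Set.contains_iff used _).mpr hmm
        rw [this] at hKfree
        cases hKfree
      have hadd : PySem.Set.add used (pvCand orig (1 + (k0 : Int)))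
          = used ++ [pvCand orig (1 + (k0 : Int))] :=
        PySem.Set.add_of_not_mem hnotmem
      congr 1
      apply ih
      set Kv : Int := 1 + (k0 : Int) with hKv
      rw [hgd, hins]
      set d3 := (d.insert orig (Kv + 1)).insert (pvCand orig Kv) 1 with hd3
      have hfreshA : (d.insert orig (Kv + 1)).contains (pvCand orig Kv) = false := by
        rw [pvContains_insert_mem hin]
        exact hfree
      have hcont3 : ∀ t, d3.contains t = (t == pvCand orig Kv || d.contains t) := by
        intro t
        rw [hd3, PySem.Dict.contains_insert, pvContains_insert_mem hin]
      refine ⟨?_, ?_, ?_, ?_, ?_⟩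
      · rw [hadd]
        exact pvNodup_append_singleton hnu hnotmem
      · exact PySem.Dict.nodup_keys_insert _ _ _ (PySem.Dict.nodup_keys_insert _ _ _ hnd)
      · intro t
        rw [hcont3, hadd, pvSetContains_append, hmem]
      · rw [hadd]
        simp only [List.length_append, List.length_singleton]
        rw [hlen, hd3]
        rw [PySem.Dict.size_insert, PySem.Dict.size_insert]
        rw [if_pos hin, if_neg (by rw [hfreshA]; simp)]
      · intro s c' hgets
        rw [hd3, PySem.Dict.get?_insert, PySem.Dict.get?_insert] at hgets
        by_cases hsc : s = pvCand orig Kv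
        · rw [if_pos hsc] at hgets
          obtain rfl : (1 : Int) = c' := by injection hgets
          exact ⟨le_rfl, fun k hk1 hk2 => by omega⟩
        · rw [if_neg hsc] at hgets
          by_cases hso : s = orig
          · rw [if_pos hso] at hgets
            obtain rfl : Kv + 1 = c' := by injection hgets
            subst hso
            refine ⟨by omega, fun k hk1 hk2 => ?_⟩
            rw [hcont3]
            by_cases hkK : k = Kv
            · subst hkK; simp
            · rw [hbelowK k hk1 (by omega)]; simp
          · rw [if_neg hso] at hgets
            obtain ⟨h1, h2⟩ := hcnt s c' hgets
            refine ⟨h1, fun k hk1 hk2 => ?_⟩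
            rw [hcont3, h2 k hk1 hk2]
            simp
    · -- first occurrence
      have hin' : d.contains orig = false := by
        cases h : d.contains orig
        · rfl
        · exact absurd h hin
      rw [if_neg hin, if_neg (by rw [← hmem orig, hin']; simp)]
      have hnotmem : orig ∉ used := by
        have := hmem orig
        rw [hin'] at this
        intro hm
        rw [(PySem.Set.contains_iff _ _).mpr hm] at this
        cases this
      have hadd : PySem.Set.add used orig = used ++ [orig] := PySem.Set.add_of_not_mem hnotmem
      congr 1
      apply ih
      have hcont2 : ∀ t, (d.insert orig 1).contains t = (t == orig || d.contains t) :=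
        fun t => PySem.Dict.contains_insert _ _ _ _
      refine ⟨?_, PySem.Dict.nodup_keys_insert _ _ _ hnd, ?_, ?_, ?_⟩
      · rw [hadd]
        exact pvNodup_append_singleton hnu hnotmem
      · intro t
        rw [hcont2, hadd, pvSetContains_append, hmem]
      · rw [hadd]
        simp only [List.length_append, List.length_singleton]
        rw [hlen, PySem.Dict.size_insert, if_neg (by rw [hin']; simp)]
      · intro s c' hgets
        rw [PySem.Dict.get?_insert] at hgets
        by_cases hso : s = orig
        · rw [if_pos hso] at hgets
          obtain rfl : (1 : Int) = c' := by injection hgets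
          exact ⟨le_rfl, fun k hk1 hk2 => by omega⟩
        · rw [if_neg hso] at hgets
          obtain ⟨h1, h2⟩ := hcnt s c' hgets
          refine ⟨h1, fun k hk1 hk2 => ?_⟩
          rw [hcont2, h2 k hk1 hk2]
          simp

-- ===== VERDICT (by name: the statement is the Claim_ definition above) =====
theorem fileNaming_spec : Claim_equal_fileNaming := by
  intro names _
  unfold Spec_fileNaming fileNaming fileNaming_alt
  apply pvMain
  refine ⟨List.nodup_nil, PySem.Dict.nodup_keys_empty,
    fun t => by simp [PySem.Dict.contains_empty, PySem.Set.contains],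
    by simp [PySem.Dict.size_empty, PySem.Set.empty],
    fun s c h => by simp [PySem.Dict.get?_empty] at h⟩
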